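-- pv_equiv track=rewrite | github.com/Kolenkovskin/feesink-showcase | feesink/api/_stripe.py | stripe_parse_sig_header
-- ===== SOURCE A (Python) =====
-- from typing import Any, Dict, Optional, Tuple, Union
--
-- def stripe_parse_sig_header(sig_header: str) -> tuple[Optional[int], Optional[str]]:
--     if not sig_header:
--         return None, None
--     ts: Optional[int] = None
--     v1: Optional[str] = None
--     for part in sig_header.split(","):
--         part = part.strip()
--         if part.startswith("t="):
--             try:
--                 ts = int(part[2:])
--             except Exception:
--                 ts = None
--         elif part.startswith("v1="):
--             v1 = part[3:].strip()
--     return ts, v1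
-- ===== SOURCE B (Python) =====
-- def stripe_parse_sig_header(sig_header):
--     fields = {}
--     for part in sig_header.split(","):
--         part = part.strip()
--         if "=" in part:
--             key, value = part.split("=", 1)
--             fields[key] = value
--     try:
--         ts = int(fields["t"])
--     except Exception:
--         ts = None
--     v1 = fields["v1"].strip() if "v1" in fields else None
--     return ts, v1
-- ===== Notes on version B (the rewrite author's own statement) =====
-- stated objective: idiomatic
-- what changed: B replaces A's per-part prefix tests with two running accumulators by the standard parse: split each part on '=' once into a key->value dict, then read 't' (via int with try/except) and 'v1' from the dict afterwards.
import Mathlib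
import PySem

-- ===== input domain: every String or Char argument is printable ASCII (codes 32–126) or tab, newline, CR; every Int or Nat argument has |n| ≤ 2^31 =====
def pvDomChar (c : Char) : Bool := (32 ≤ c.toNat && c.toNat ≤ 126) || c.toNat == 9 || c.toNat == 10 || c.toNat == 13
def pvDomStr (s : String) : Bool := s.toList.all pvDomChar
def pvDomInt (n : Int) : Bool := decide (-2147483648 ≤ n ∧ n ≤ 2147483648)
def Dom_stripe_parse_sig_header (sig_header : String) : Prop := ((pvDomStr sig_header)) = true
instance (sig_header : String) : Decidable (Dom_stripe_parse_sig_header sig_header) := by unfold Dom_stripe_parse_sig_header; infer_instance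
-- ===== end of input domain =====

-- B parses the header into a key→value dict in one pass and reads 't'/'v1' afterwards, instead of
-- A's prefix tests with two running accumulators: more idiomatic, same cost; proved equal on Dom.

-- ===== PORT A =====
-- one iteration of A's loop over the comma-separated parts, state (ts, v1)
def pvStepA (st : Option Int × Option String) (part : List Char) : Option Int × Option String :=
  let p := PySem.Chars.strip part
  if PySem.Chars.startswith p ['t', '='] then
    (PySem.Int.ofChars? (p.drop 2), st.2)            -- ts = int(part[2:]) / None on ValueError
  else if PySem.Chars.startswith p ['v', '1', '='] then
    (st.1, some (String.ofList (PySem.Chars.strip (p.drop 3))))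
  else st

def stripe_parse_sig_header (sig_header : String) : Option Int × Option String :=
  if sig_header.toList = [] then (none, none)        -- if not sig_header
  else (PySem.Chars.splitOn sig_header.toList [',']).foldl pvStepA (none, none)

-- ===== PORT B =====
-- one iteration of B's loop: store key→value into the dict when the part contains '='
def pvStepB (d : PySem.Dict (List Char) (List Char)) (part : List Char) :
    PySem.Dict (List Char) (List Char) :=
  let p := PySem.Chars.strip part
  if PySem.Chars.isIn ['='] p then
    -- key, value = part.split("=", 1): exact hand port for maxsplit=1 when '=' ∈ p —
    -- key is everything before the first '=', value everything after it
    d.insert (p.takeWhile (· ≠ '=')) (p.drop ((p.takeWhile (· ≠ '=')).length + 1))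
  else d

def stripe_parse_sig_header_alt (sig_header : String) : Option Int × Option String :=
  let d := (PySem.Chars.splitOn sig_header.toList [',']).foldl pvStepB PySem.Dict.empty
  (match d.get? ['t'] with                            -- try: int(fields["t"]) except: None
   | some v => PySem.Int.ofChars? v
   | none => none,
   (d.get? ['v', '1']).map (fun v => String.ofList (PySem.Chars.strip v)))

-- ===== PRECONDITION & SPEC =====
def Spec_stripe_parse_sig_header (sig_header : String) (out : Option Int × Option String) : Prop := out = stripe_parse_sig_header_alt sig_header
instance (sig_header : String) (out : Option Int × Option String) : Decidable (Spec_stripe_parse_sig_header sig_header out) := by unfold Spec_stripe_parse_sig_header; infer_instance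

-- ===== CLAIM (what is proved, stated in full; the proofs are below) =====
def Claim_equal_stripe_parse_sig_header : Prop := ∀ (sig_header : String), Dom_stripe_parse_sig_header sig_header → Spec_stripe_parse_sig_header sig_header (stripe_parse_sig_header sig_header)

-- ===== LEMMAS AND PROOFS =====

-- A's loop state, read off B's dict
def pvInterp (d : PySem.Dict (List Char) (List Char)) : Option Int × Option String :=
  (match d.get? ['t'] with
   | some v => PySem.Int.ofChars? v
   | none => none,
   (d.get? ['v', '1']).map (fun v => String.ofList (PySem.Chars.strip v)))

-- a list containing '=' is (key) ++ '=' :: (value) with key = takeWhile (· ≠ '=')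
theorem pv_decomp (p : List Char) (h : '=' ∈ p) :
    p = p.takeWhile (· ≠ '=') ++ '=' :: p.drop ((p.takeWhile (· ≠ '=')).length + 1) := by
  have hdw : p.dropWhile (· ≠ '=') ≠ [] := by
    rw [Ne, List.dropWhile_eq_nil_iff]
    intro hall
    have := hall '=' h
    simp at this
  obtain ⟨hd, tl, hcons⟩ := List.exists_cons_of_ne_nil hdw
  have hhd : hd = '=' := by
    have := List.head_dropWhile_not (fun c => decide (c ≠ '=')) hdw
    simp only [hcons] at this
    simpa using this
  have hsplit : p.takeWhile (· ≠ '=') ++ p.dropWhile (· ≠ '=') = p :=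
    List.takeWhile_append_dropWhile
  have hdrop : p.drop ((p.takeWhile (· ≠ '=')).length + 1) = tl := by
    obtain ⟨k, hk⟩ : ∃ k, p.takeWhile (· ≠ '=') = k := ⟨_, rfl⟩
    rw [hk] at hsplit ⊢
    rw [← hsplit, hcons, List.drop_length_add_append]
    simp
  rw [hdrop]
  conv_lhs => rw [← hsplit, hcons, hhd]

-- one loop iteration: A's step on the interpreted state is the interpretation of B's step
theorem pv_step (d : PySem.Dict (List Char) (List Char)) (part : List Char) :
    pvStepA (pvInterp d) part = pvInterp (pvStepB d part) := by
  simp only [pvStepA, pvStepB]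
  generalize PySem.Chars.strip part = p
  by_cases h1 : PySem.Chars.startswith p ['t', '='] = true
  · obtain ⟨r, hr⟩ := (PySem.Chars.startswith_iff p ['t', '=']).mp h1
    subst hr
    have hin : PySem.Chars.isIn ['='] (['t', '='] ++ r) = true := by
      rw [PySem.Chars.isIn_iff_infix, List.singleton_infix_iff]; simp
    have htw : (['t', '='] ++ r).takeWhile (· ≠ '=') = ['t'] := by
      simp [List.takeWhile]
    rw [if_pos h1, if_pos hin, htw]
    unfold pvInterp
    rw [PySem.Dict.get?_insert_self, PySem.Dict.get?_insert_of_ne _ _ (by decide)]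
    simp
  · by_cases h2 : PySem.Chars.startswith p ['v', '1', '='] = true
    · obtain ⟨r, hr⟩ := (PySem.Chars.startswith_iff p ['v', '1', '=']).mp h2
      subst hr
      have hin : PySem.Chars.isIn ['='] (['v', '1', '='] ++ r) = true := by
        rw [PySem.Chars.isIn_iff_infix, List.singleton_infix_iff]; simp
      have htw : (['v', '1', '='] ++ r).takeWhile (· ≠ '=') = ['v', '1'] := by
        simp [List.takeWhile]
      rw [if_neg h1, if_pos h2, if_pos hin, htw]
      unfold pvInterp
      rw [PySem.Dict.get?_insert_self, PySem.Dict.get?_insert_of_ne _ _ (by decide)]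
      simp
    · by_cases hin : PySem.Chars.isIn ['='] p = true
      · have hmem : '=' ∈ p := by
          rw [PySem.Chars.isIn_iff_infix, List.singleton_infix_iff] at hin; exact hin
        have hdec := pv_decomp p hmem
        have hkt : p.takeWhile (· ≠ '=') ≠ ['t'] := by
          intro hk
          rw [hk] at hdec
          exact h1 (by rw [PySem.Chars.startswith_iff, hdec]; exact ⟨_, rfl⟩)
        have hkv : p.takeWhile (· ≠ '=') ≠ ['v', '1'] := by
          intro hk
          rw [hk] at hdec
          exact h2 (by rw [PySem.Chars.startswith_iff, hdec]; exact ⟨_, rfl⟩)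
        rw [if_neg h1, if_neg h2, if_pos hin]
        unfold pvInterp
        rw [PySem.Dict.get?_insert_of_ne _ _ (Ne.symm hkt),
            PySem.Dict.get?_insert_of_ne _ _ (Ne.symm hkv)]
      · rw [if_neg h1, if_neg h2, if_neg hin]

-- the whole loop
theorem pv_fold (parts : List (List Char)) (d : PySem.Dict (List Char) (List Char)) :
    parts.foldl pvStepA (pvInterp d) = pvInterp (parts.foldl pvStepB d) := by
  induction parts generalizing d with
  | nil => rfl
  | cons x xs ih => simp only [List.foldl_cons, pv_step d x]; exact ih _

-- ===== VERDICT (by name: the statement is the Claim_ definition above) =====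
theorem stripe_parse_sig_header_spec : Claim_equal_stripe_parse_sig_header := by
  intro s _
  unfold Spec_stripe_parse_sig_header stripe_parse_sig_header
  by_cases h : s.toList = []
  · rw [if_pos h]
    unfold stripe_parse_sig_header_alt
    rw [h]
    decide
  · rw [if_neg h]
    have hempty : (none, none) = pvInterp (PySem.Dict.empty (κ := List Char) (ν := List Char)) := rfl
    rw [hempty, pv_fold]
    rfl
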